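-- pv_equiv track=rewrite | github.com/esaitchkim/boj-algorithms | python3/0/2/2798.py | get_max_card_sum
-- ===== SOURCE A (Python) =====
-- def get_max_card_sum(N: int, M: int, cards: list):
--     """M을 넘지 않는 3개 수의 최댓값을 구하는 함수
--
--     Args:
--         N (int): cards의 길이
--         M (int): 넘으면 안되는 수
--         cards (list): 숫자 리스트
--
--     Returns:
--         int: M을 넘지 않는 3개 수의 최댓값
--     """
--     max_sum = 0
--     for i in range(N - 2):
--         if cards[i] >= M:
--             return max_sum
--         for j in range(i + 1, N - 1):
--             if cards[i] + cards[j] >= M: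
--                 return max_sum
--             for k in range(j + 1, N):
--                 card_sum = cards[i] + cards[j] + cards[k]
--                 if card_sum == M:
--                     return card_sum
--                 elif card_sum < M:
--                     max_sum = max(max_sum, card_sum)
--                 else:
--                     break
--
--     return max_sum
-- ===== SOURCE B (Python) =====
-- def get_max_card_sum(N: int, M: int, cards: list):
--     """M을 넘지 않는 3개 수의 최댓값을 구하는 함수 (suffix-walk re-implementation)."""
--     if N < 3:
--         return 0
--     best = 0
--     xs = cards[:N]
--     while len(xs) >= 3:
--         a = xs[0]
--         if a >= M:
--             return best
--         ys = xs[1:]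
--         while len(ys) >= 2:
--             b = ys[0]
--             zs = ys[1:]
--             s = a + b
--             if s >= M:
--                 return best
--             # boundary: first position whose card pushes the sum to M or beyond
--             t = next((u for u, z in enumerate(zs) if s + z >= M), len(zs))
--             if t < len(zs) and s + zs[t] == M:
--                 return M
--             if t > 0:
--                 best = max(best, s + max(zs[:t]))
--             ys = zs
--         xs = xs[1:]
--     return best
-- ===== Notes on version B (the rewrite author's own statement) =====
-- stated objective: alternative
-- what changed: B walks suffixes of cards[:N] and replaces A's per-card innermost loop (running max with break) by a threshold search for the first card reaching M plus a single max over the slice before it, updating best once per pair.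
-- outside the precondition, e.g. on get_max_card_sum(7, 3, [2, -8, -2, -5, -7, 10]): A returns 0, B returns 3; on get_max_card_sum(5, 10, [1, 2, 3, 4]): A raises IndexError, B returns 9
import Mathlib
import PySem

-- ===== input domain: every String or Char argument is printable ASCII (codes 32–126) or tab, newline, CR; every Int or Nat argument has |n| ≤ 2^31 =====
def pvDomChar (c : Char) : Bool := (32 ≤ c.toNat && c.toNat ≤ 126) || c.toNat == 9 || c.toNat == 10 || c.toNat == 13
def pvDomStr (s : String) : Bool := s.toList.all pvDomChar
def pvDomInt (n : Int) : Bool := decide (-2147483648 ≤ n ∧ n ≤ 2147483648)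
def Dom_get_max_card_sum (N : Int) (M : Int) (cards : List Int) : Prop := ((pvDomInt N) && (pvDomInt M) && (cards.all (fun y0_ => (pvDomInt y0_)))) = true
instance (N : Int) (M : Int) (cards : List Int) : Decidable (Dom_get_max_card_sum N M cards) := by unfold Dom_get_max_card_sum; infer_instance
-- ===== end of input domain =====

-- B walks suffixes of cards[:N], replacing A's per-card inner loop by a threshold search plus one slice max;
-- equivalence of the RETURN value is proved on Pre_ (N within the list length, or N < 3).

-- ===== PORT A =====
-- inner k-loop: .inl r = the function returns r; .inr best = loop ended / broke with updated max_sum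
def aK (cards : List Int) (M s : Int) : List Int → Int → Int ⊕ Int
  | [], best => .inr best
  | k :: ks, best =>
      let cs := s + PySem.List.pyGetD cards k 0
      if cs = M then .inl cs
      else if cs < M then aK cards M s ks (max best cs)
      else .inr best

def aJ (cards : List Int) (M N ci : Int) : List Int → Int → Int ⊕ Int
  | [], best => .inr best
  | j :: js, best =>
      let cj := PySem.List.pyGetD cards j 0
      if ci + cj ≥ M then .inl best
      else
        match aK cards M (ci + cj) (PySem.List.pyRange (j + 1) N 1) best with
        | .inl r => .inl r
        | .inr best' => aJ cards M N ci js best'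

def aI (cards : List Int) (M N : Int) : List Int → Int → Int
  | [], best => best
  | i :: is, best =>
      let ci := PySem.List.pyGetD cards i 0
      if ci ≥ M then best
      else
        match aJ cards M N ci (PySem.List.pyRange (i + 1) (N - 1) 1) best with
        | .inl r => r
        | .inr best' => aI cards M N is best'

def get_max_card_sum (N : Int) (M : Int) (cards : List Int) : Int :=
  aI cards M N (PySem.List.pyRange 0 (N - 2) 1) 0

-- ===== PORT B =====
-- next((u for u, z in enumerate(zs) if s + z >= M), len(zs))
def bFind (M s : Int) : List Int → Nat
  | [] => 0
  | z :: zs => if s + z ≥ M then 0 else bFind M s zs + 1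

-- the inner while over ys; .inl r = return r, .inr best = loop ended
def bJ (M a : Int) : List Int → Int → Int ⊕ Int
  | [], best => .inr best
  | b :: zs, best =>
      if zs = [] then .inr best    -- len(ys) < 2
      else
        let s := a + b
        if s ≥ M then .inl best
        else
          let t := bFind M s zs
          if t < zs.length ∧ s + zs.getD t 0 = M then .inl M
          else
            bJ M a zs
              (if 0 < t then max best (s + (PySem.List.max? (zs.take t) (fun y => y)).getD 0)
               else best)

-- the outer while over xs
def bI (M : Int) : List Int → Int → Int
  | [], best => best
  | a :: ys, best =>
      if ys.length < 2 then best   -- len(xs) < 3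
      else if a ≥ M then best
      else
        match bJ M a ys best with
        | .inl r => r
        | .inr best' => bI M ys best'

def get_max_card_sum_alt (N : Int) (M : Int) (cards : List Int) : Int :=
  if N < 3 then 0
  else bI M (PySem.List.slice cards none (some N)) 0

-- ===== PRECONDITION & SPEC =====
-- Pre_ excludes N exceeding the list length (with N ≥ 3): there A indexes past the list and usually
-- raises IndexError; when an early guard lets it return first, the value reflects only a truncated scan.
def Pre_get_max_card_sum (N : Int) (M : Int) (cards : List Int) : Prop :=
  3 ≤ N → N ≤ cards.length
instance (N : Int) (M : Int) (cards : List Int) : Decidable (Pre_get_max_card_sum N M cards) := by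
  unfold Pre_get_max_card_sum; infer_instance

def pvWitness_get_max_card_sum : Int × Int × List Int := (3, 10, [1, 2, 3])

def Spec_get_max_card_sum (N : Int) (M : Int) (cards : List Int) (out : Int) : Prop := out = get_max_card_sum_alt N M cards
instance (N : Int) (M : Int) (cards : List Int) (out : Int) : Decidable (Spec_get_max_card_sum N M cards out) := by unfold Spec_get_max_card_sum; infer_instance

-- ===== CLAIM (what is proved, stated in full; the proofs are below) =====
def Claim_equal_get_max_card_sum : Prop := ∀ (N : Int) (M : Int) (cards : List Int), Dom_get_max_card_sum N M cards → Pre_get_max_card_sum N M cards → Spec_get_max_card_sum N M cards (get_max_card_sum N M cards)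

-- ===== LEMMAS AND PROOFS =====

-- value-level rendering of A's loops (proof helpers)
def vK (M s : Int) : List Int → Int → Int ⊕ Int
  | [], best => .inr best
  | z :: zs, best =>
      let cs := s + z
      if cs = M then .inl cs
      else if cs < M then vK M s zs (max best cs)
      else .inr best

def vJ (M a : Int) : List Int → Int → Int ⊕ Int
  | [], best => .inr best
  | b :: zs, best =>
      if zs = [] then .inr best
      else if a + b ≥ M then .inl best
      else
        match vK M (a + b) zs best with
        | .inl r => .inl r
        | .inr best' => vJ M a zs best'

def vI (M : Int) : List Int → Int → Int
  | [], best => best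
  | a :: ys, best =>
      if ys.length < 2 then best
      else if a ≥ M then best
      else
        match vJ M a ys best with
        | .inl r => r
        | .inr best' => vI M ys best'

lemma maxD_cons (z : Int) (l : List Int) :
    (PySem.List.max? (z :: l) (fun y => y)).getD 0 = l.foldl max z := by
  rw [PySem.List.max?_id_cons]; rfl

lemma foldl_max_max (l : List Int) (a b : Int) :
    l.foldl max (max a b) = max a (l.foldl max b) := by
  induction l generalizing b with
  | nil => rfl
  | cons c l ih =>
      simp only [List.foldl_cons, max_assoc]
      exact ih (max b c)

-- A's inner loop equals B's threshold-search-plus-slice-max computation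
lemma vK_eq_find (M s : Int) (zs : List Int) (best : Int) :
    vK M s zs best =
      (let t := bFind M s zs;
       if t < zs.length ∧ s + zs.getD t 0 = M then .inl M
       else .inr (if 0 < t then max best (s + (PySem.List.max? (zs.take t) (fun y => y)).getD 0) else best)) := by
  induction zs generalizing best with
  | nil => simp [vK, bFind]
  | cons z zs ih =>
      by_cases h1 : s + z = M
      · simp [vK, bFind, h1]
      · by_cases h2 : s + z < M
        · have hge : ¬ s + z ≥ M := by omega
          have hL : vK M s (z :: zs) best = vK M s zs (max best (s + z)) := by
            simp [vK, h1, h2]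
          rw [hL, ih (max best (s + z))]
          have hbf : bFind M s (z :: zs) = bFind M s zs + 1 := by
            simp [bFind, hge]
          simp only [hbf]
          by_cases hC : bFind M s zs < zs.length ∧ s + zs.getD (bFind M s zs) 0 = M
          · have hC' : bFind M s zs + 1 < (z :: zs).length ∧
                s + (z :: zs).getD (bFind M s zs + 1) 0 = M := by
              refine ⟨by simp; omega, ?_⟩
              simpa using hC.2
            have heq : s + zs[bFind M s zs] = M := by
              rw [← List.getD_eq_getElem zs 0 hC.1]; exact hC.2
            simp [hC, heq]
          · have hC' : ¬ (bFind M s zs + 1 < (z :: zs).length ∧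
                s + (z :: zs).getD (bFind M s zs + 1) 0 = M) := by
              intro h; exact hC ⟨by simpa using h.1, by simpa using h.2⟩
            simp only [if_neg hC, if_neg hC']
            have htake : (z :: zs).take (bFind M s zs + 1) = z :: zs.take (bFind M s zs) := by
              simp [List.take_succ_cons]
            rw [htake]
            by_cases h4 : 0 < bFind M s zs
            · obtain ⟨w, ws, hzs⟩ : ∃ w ws, zs = w :: ws := by
                cases zs with
                | nil => simp [bFind] at h4
                | cons w ws => exact ⟨w, ws, rfl⟩
              subst hzs
              have htk2 : (w :: ws).take (bFind M s (w :: ws))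
                  = w :: ws.take (bFind M s (w :: ws) - 1) := by
                cases hbf2 : bFind M s (w :: ws) with
                | zero => omega
                | succ n => simp [List.take_succ_cons]
              rw [htk2, if_pos h4, if_pos (Nat.succ_pos _), maxD_cons, maxD_cons,
                List.foldl_cons, foldl_max_max]
              congr 1
              omega
            · have h0 : bFind M s zs = 0 := by omega
              simp [h0, maxD_cons]
        · have hgt : s + z ≥ M := by omega
          simp [vK, bFind, h1, h2, hgt]

-- hence the inner while loops agree
lemma vJ_eq_bJ (M a : Int) (ys : List Int) (best : Int) :
    vJ M a ys best = bJ M a ys best := by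
  induction ys generalizing best with
  | nil => rfl
  | cons b zs ih =>
      by_cases hz : zs = []
      · simp [vJ, bJ, hz]
      · by_cases hs : a + b ≥ M
        · simp [vJ, bJ, hz, hs]
        · have hv : vJ M a (b :: zs) best =
              (match vK M (a + b) zs best with
               | .inl r => (.inl r : Int ⊕ Int)
               | .inr best' => vJ M a zs best') := by
            simp [vJ, hz, hs]
          have hb : bJ M a (b :: zs) best =
              (if bFind M (a + b) zs < zs.length ∧ (a + b) + zs.getD (bFind M (a + b) zs) 0 = M
               then (.inl M : Int ⊕ Int)
               else bJ M a zs
                 (if 0 < bFind M (a + b) zs then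
                    max best ((a + b) + (PySem.List.max? (zs.take (bFind M (a + b) zs)) (fun y => y)).getD 0)
                  else best)) := by
            simp [bJ, hz, hs]
          rw [hv, hb, vK_eq_find]
          by_cases hC : bFind M (a + b) zs < zs.length ∧ (a + b) + zs.getD (bFind M (a + b) zs) 0 = M
          · have heq : a + b + zs[bFind M (a + b) zs] = M := by
              rw [← List.getD_eq_getElem zs 0 hC.1]; exact hC.2
            simp [hC, heq]
          · simp only [if_neg hC]
            exact ih _

lemma vI_eq_bI (M : Int) (xs : List Int) (best : Int) :
    vI M xs best = bI M xs best := by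
  induction xs generalizing best with
  | nil => rfl
  | cons a ys ih =>
      simp only [vI, bI, vJ_eq_bJ]
      split
      · rfl
      · split
        · rfl
        · cases bJ M a ys best with
          | inl r => rfl
          | inr best' => exact ih best'

-- index-to-value bridges for A's loops (xs = cards.take N.toNat, N ≤ len cards)
lemma aK_bridge (cards : List Int) (M s N : Int) (hN : 0 ≤ N) (hlen : N.toNat ≤ cards.length) :
    ∀ fuel (m : Int) (best : Int), 0 ≤ m → (N - m).toNat ≤ fuel →
      aK cards M s (PySem.List.pyRange m N 1) best
        = vK M s ((cards.take N.toNat).drop m.toNat) best := by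
  intro fuel
  induction fuel with
  | zero =>
      intro m best hm hf
      have hmN : N ≤ m := by omega
      rw [PySem.List.pyRange_one_eq_nil hmN]
      have : (cards.take N.toNat).drop m.toNat = [] := by
        apply List.drop_eq_nil_of_le
        simp [List.length_take]; omega
      simp [this, aK, vK]
  | succ fuel ih =>
      intro m best hm hf
      by_cases hmN : m < N
      · rw [PySem.List.pyRange_one_cons hmN]
        have hmlt : m.toNat < cards.length := by omega
        have hlt' : m.toNat < (cards.take N.toNat).length := by
          simp [List.length_take]; omega
        have hdrop : (cards.take N.toNat).drop m.toNat
            = (cards.take N.toNat)[m.toNat] :: (cards.take N.toNat).drop (m.toNat + 1) :=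
          List.drop_eq_getElem_cons hlt'
        have hget : PySem.List.pyGetD cards m 0 = cards[m.toNat] := by
          exact PySem.List.pyGetD_eq_getElem cards 0 hm (by omega)
        have hgetel : (cards.take N.toNat)[m.toNat] = cards[m.toNat] := by
          simp
        rw [hdrop]
        simp only [aK, vK, hget, hgetel]
        have hm1 : (m + 1).toNat = m.toNat + 1 := by omega
        split
        · rfl
        · split
          · rw [ih (m + 1) _ (by omega) (by omega), hm1]
          · rfl
      · rw [PySem.List.pyRange_one_eq_nil (by omega)]
        have : (cards.take N.toNat).drop m.toNat = [] := by
          apply List.drop_eq_nil_of_le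
          simp [List.length_take]; omega
        simp [this, aK, vK]

lemma aJ_bridge (cards : List Int) (M N ci : Int) (hN : 0 ≤ N) (hlen : N.toNat ≤ cards.length) :
    ∀ fuel (j : Int) (best : Int), 0 ≤ j → (N - j).toNat ≤ fuel →
      aJ cards M N ci (PySem.List.pyRange j (N - 1) 1) best
        = vJ M ci ((cards.take N.toNat).drop j.toNat) best := by
  intro fuel
  induction fuel with
  | zero =>
      intro j best hj hf
      have : N ≤ j := by omega
      rw [PySem.List.pyRange_one_eq_nil (by omega)]
      have hd : (cards.take N.toNat).drop j.toNat = [] := by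
        apply List.drop_eq_nil_of_le; simp [List.length_take]; omega
      simp [hd, aJ, vJ]
  | succ fuel ih =>
      intro j best hj hf
      by_cases hjN : j < N - 1
      · rw [PySem.List.pyRange_one_cons hjN]
        have hlt' : j.toNat < (cards.take N.toNat).length := by
          simp [List.length_take]; omega
        have hdrop : (cards.take N.toNat).drop j.toNat
            = (cards.take N.toNat)[j.toNat] :: (cards.take N.toNat).drop (j.toNat + 1) :=
          List.drop_eq_getElem_cons hlt'
        have hget : PySem.List.pyGetD cards j 0 = cards[j.toNat] := by
          exact PySem.List.pyGetD_eq_getElem cards 0 hj (by omega)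
        have hgetel : (cards.take N.toNat)[j.toNat] = cards[j.toNat] := by simp
        have hne : (cards.take N.toNat).drop (j.toNat + 1) ≠ [] := by
          have : ((cards.take N.toNat).drop (j.toNat + 1)).length ≠ 0 := by
            simp [List.length_take]; omega
          intro h; rw [h] at this; simp at this
        have hj1 : (j + 1).toNat = j.toNat + 1 := by omega
        rw [hdrop]
        simp only [aJ, vJ, hget, hgetel, if_neg hne]
        split
        · rfl
        · rw [aK_bridge cards M (ci + cards[j.toNat]) N hN hlen ((N - (j+1)).toNat) (j + 1) best (by omega) (by omega), hj1]
          cases vK M (ci + cards[j.toNat]) ((cards.take N.toNat).drop (j.toNat + 1)) best with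
          | inl r => rfl
          | inr best' =>
              simp only []
              rw [ih (j + 1) best' (by omega) (by omega), hj1]
      · rw [PySem.List.pyRange_one_eq_nil (by omega)]
        have hlen' : ((cards.take N.toNat).drop j.toNat).length ≤ 1 := by
          simp [List.length_take]; omega
        simp only [aJ]
        cases hc : (cards.take N.toNat).drop j.toNat with
        | nil => rfl
        | cons b zs =>
            have hlz : (b :: zs).length ≤ 1 := hc ▸ hlen'
            rw [List.length_cons] at hlz
            have : zs = [] := List.eq_nil_of_length_eq_zero (by omega)
            simp [vJ, this]

lemma aI_bridge (cards : List Int) (M N : Int) (hN : 0 ≤ N) (hlen : N.toNat ≤ cards.length) :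
    ∀ fuel (i : Int) (best : Int), 0 ≤ i → (N - i).toNat ≤ fuel →
      aI cards M N (PySem.List.pyRange i (N - 2) 1) best
        = vI M ((cards.take N.toNat).drop i.toNat) best := by
  intro fuel
  induction fuel with
  | zero =>
      intro i best hi hf
      have : N ≤ i := by omega
      rw [PySem.List.pyRange_one_eq_nil (by omega)]
      have hd : (cards.take N.toNat).drop i.toNat = [] := by
        apply List.drop_eq_nil_of_le; simp [List.length_take]; omega
      simp [hd, aI, vI]
  | succ fuel ih =>
      intro i best hi hf
      by_cases hiN : i < N - 2
      · rw [PySem.List.pyRange_one_cons hiN]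
        have hlt' : i.toNat < (cards.take N.toNat).length := by
          simp [List.length_take]; omega
        have hdrop : (cards.take N.toNat).drop i.toNat
            = (cards.take N.toNat)[i.toNat] :: (cards.take N.toNat).drop (i.toNat + 1) :=
          List.drop_eq_getElem_cons hlt'
        have hget : PySem.List.pyGetD cards i 0 = cards[i.toNat] := by
          exact PySem.List.pyGetD_eq_getElem cards 0 hi (by omega)
        have hgetel : (cards.take N.toNat)[i.toNat] = cards[i.toNat] := by simp
        have hlen2 : ¬ ((cards.take N.toNat).drop (i.toNat + 1)).length < 2 := by
          simp [List.length_take]; omega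
        have hi1 : (i + 1).toNat = i.toNat + 1 := by omega
        rw [hdrop]
        simp only [aI, vI, hget, hgetel, if_neg hlen2]
        split
        · rfl
        · rw [aJ_bridge cards M N cards[i.toNat] hN hlen ((N - (i+1)).toNat) (i + 1) best (by omega) (by omega), hi1]
          cases vJ M cards[i.toNat] ((cards.take N.toNat).drop (i.toNat + 1)) best with
          | inl r => rfl
          | inr best' =>
              simp only []
              rw [ih (i + 1) best' (by omega) (by omega), hi1]
      · rw [PySem.List.pyRange_one_eq_nil (by omega)]
        have hlen' : ((cards.take N.toNat).drop i.toNat).length ≤ 2 := by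
          simp [List.length_take]; omega
        simp only [aI]
        cases hc : (cards.take N.toNat).drop i.toNat with
        | nil => rfl
        | cons a ys =>
            have hlz : (a :: ys).length ≤ 2 := hc ▸ hlen'
            rw [List.length_cons] at hlz
            have : ys.length < 2 := by omega
            simp [vI, this]

-- ===== VERDICT (by name: the statement is the Claim_ definition above) =====
theorem get_max_card_sum_spec : Claim_equal_get_max_card_sum := by
  intro N M cards _ hpre
  unfold Spec_get_max_card_sum get_max_card_sum get_max_card_sum_alt
  by_cases h3 : N < 3
  · rw [if_pos h3]
    rw [show PySem.List.pyRange 0 (N - 2) 1 = [] from PySem.List.pyRange_one_eq_nil (by omega)]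
    rfl
  · rw [if_neg h3]
    have hN : 0 ≤ N := by omega
    have hlen : N.toNat ≤ cards.length := by
      have := hpre (by omega); omega
    rw [PySem.List.slice_to cards hN]
    rw [aI_bridge cards M N hN hlen N.toNat 0 0 le_rfl (by omega)]
    simp [vI_eq_bI]
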